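-- pv_equiv track=rewrite | github.com/kushalcodez/rugved_kushal | question3.py | hillno
-- ===== SOURCE A (Python) =====
-- def hillno(num):
--
--     digits = str(abs(num))
--     n = len(digits)
--
--     if n <= 2:
--         return True
--     peak = 0
--     while peak < n - 1 and digits[peak] <= digits[peak + 1]:
--         peak += 1
--
--     for i in range(peak, n - 1):
--         if digits[i] <= digits[i + 1]:
--             return False
--
--     return peak > 0
-- ===== SOURCE B (Python) =====
-- def hillno(num):
--     digits = str(abs(num))
--     if len(digits) <= 2:
--         return True
--     # boolean profile of adjacent comparisons: comps[i] == digits ascend (non-strictly) at i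
--     comps = [a <= b for a, b in zip(digits, digits[1:])]
--     # hill shape: starts ascending, and once a descent happens there is no ascent again
--     return comps[0] and all(x or not y for x, y in zip(comps, comps[1:]))
-- ===== Notes on version B (the rewrite author's own statement) =====
-- stated objective: alternative
-- what changed: Replaced A's index-based while-loop (finding the peak) plus a second index loop over the suffix by a single comparison-profile pass: build the list of adjacent <=-comparisons once and check it starts True and never goes False-then-True.
import Mathlib
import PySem

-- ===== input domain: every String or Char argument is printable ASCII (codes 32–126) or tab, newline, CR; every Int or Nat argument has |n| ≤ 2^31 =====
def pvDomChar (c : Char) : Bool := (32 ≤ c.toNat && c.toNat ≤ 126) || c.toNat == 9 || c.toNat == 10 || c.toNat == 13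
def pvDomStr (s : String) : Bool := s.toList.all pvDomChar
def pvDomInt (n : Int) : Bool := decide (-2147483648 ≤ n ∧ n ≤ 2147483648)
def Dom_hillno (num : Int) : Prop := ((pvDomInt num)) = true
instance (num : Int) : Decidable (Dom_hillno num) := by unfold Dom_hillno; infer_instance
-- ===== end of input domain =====

-- B replaces A's two index loops (while-loop to find the peak, then a suffix check loop)
-- by one pass over the list of adjacent digit comparisons; objective: alternative decomposition.

-- ===== PORT A =====
-- while peak < n - 1 and digits[peak] <= digits[peak + 1]: peak += 1
-- (indices are guarded in range by the loop condition, so getD is exact here)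
def hillnoPeak (d : List Char) (n peak : Nat) : Nat :=
  if h : peak < n - 1 ∧ d.getD peak 'a' ≤ d.getD (peak + 1) 'a' then
    hillnoPeak d n (peak + 1)
  else peak
termination_by n - 1 - peak
decreasing_by omega

-- for i in range(peak, n - 1): if digits[i] <= digits[i + 1]: return False
-- (true = the loop finished without returning False; indices guarded in range)
def hillnoFor (d : List Char) (n i : Nat) : Bool :=
  if h : i < n - 1 then
    if d.getD i 'a' ≤ d.getD (i + 1) 'a' then false
    else hillnoFor d n (i + 1)
  else true
termination_by n - 1 - i

def hillno (num : Int) : Bool :=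
  let digits := (PySem.Int.toStr |num|).toList
  let n := digits.length
  if n ≤ 2 then true
  else
    let peak := hillnoPeak digits n 0
    if hillnoFor digits n peak then decide (0 < peak) else false

-- ===== PORT B =====
-- comps = [a <= b for a, b in zip(digits, digits[1:])]
def hillnoComps (d : List Char) : List Bool :=
  (d.zip d.tail).map (fun p => decide (p.1 ≤ p.2))

def hillno_alt (num : Int) : Bool :=
  let digits := (PySem.Int.toStr |num|).toList
  if digits.length ≤ 2 then true
  else
    let comps := hillnoComps digits
    -- comps[0] (comps is nonempty here since len(digits) ≥ 3, so headD is exact)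
    comps.headD false && (comps.zip comps.tail).all (fun p => p.1 || !p.2)

-- ===== PRECONDITION & SPEC =====
def Spec_hillno (num : Int) (out : Bool) : Prop := out = hillno_alt num
instance (num : Int) (out : Bool) : Decidable (Spec_hillno num out) := by unfold Spec_hillno; infer_instance

-- ===== CLAIM (what is proved, stated in full; the proofs are below) =====
def Claim_equal_hillno : Prop := ∀ (num : Int), Dom_hillno num → Spec_hillno num (hillno num)

-- ===== LEMMAS AND PROOFS =====

theorem comps_length (d : List Char) : (hillnoComps d).length = d.length - 1 := by
  simp [hillnoComps]

theorem comps_getElem (d : List Char) (i : Nat) (h : i < (hillnoComps d).length) :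
    (hillnoComps d)[i] = decide (d.getD i 'a' ≤ d.getD (i + 1) 'a') := by
  have hlen : i + 1 < d.length := by have := comps_length d; omega
  have h1 : d[i]? = some (d[i]'(by omega)) := List.getElem?_eq_getElem (by omega)
  have h2 : d[i + 1]? = some (d[i + 1]'hlen) := List.getElem?_eq_getElem hlen
  simp [hillnoComps, List.getElem_zip, List.getElem_tail, List.getD, h1, h2]

theorem comps_drop_cons (d : List Char) (k : Nat) (hk : k + 1 < d.length) :
    (hillnoComps d).drop k
      = decide (d.getD k 'a' ≤ d.getD (k + 1) 'a') :: (hillnoComps d).drop (k + 1) := by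
  have hk' : k < (hillnoComps d).length := by have := comps_length d; omega
  rw [List.drop_eq_getElem_cons hk', comps_getElem d k hk']

theorem peak_eq (d : List Char) (k : Nat) :
    hillnoPeak d d.length k = k + (((hillnoComps d).drop k).takeWhile id).length := by
  fun_induction hillnoPeak d d.length k with
  | case1 k hcond ih =>
    rw [comps_drop_cons d k (by omega), decide_eq_true hcond.2]
    simp [ih]
    omega
  | case2 k hcond =>
    by_cases hk : k < d.length - 1
    · have hle : ¬ (d.getD k 'a' ≤ d.getD (k + 1) 'a') := by tauto
      rw [comps_drop_cons d k (by omega), decide_eq_false hle]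
      simp
    · have : (hillnoComps d).length ≤ k := by have := comps_length d; omega
      rw [List.drop_of_length_le this]
      simp

theorem for_eq (d : List Char) (i : Nat) :
    hillnoFor d d.length i = ((hillnoComps d).drop i).all (fun b => !b) := by
  fun_induction hillnoFor d d.length i with
  | case1 i h hle =>
    rw [comps_drop_cons d i (by omega), decide_eq_true hle]
    simp
  | case2 i h hle ih =>
    rw [comps_drop_cons d i (by omega), decide_eq_false hle]
    simp [ih]
  | case3 i h =>
    have : (hillnoComps d).length ≤ i := by have := comps_length d; omega
    rw [List.drop_of_length_le this]
    simp

theorem drop_takeWhile_len (l : List Bool) :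
    l.drop (l.takeWhile id).length = l.dropWhile id := by
  induction l with
  | nil => simp
  | cons b t ih =>
    cases b <;> simp [id, ih]

theorem all_not_eq_g (l : List Bool) :
    l.all (fun b => !b) = (!l.headD false && (l.zip l.tail).all (fun p => p.1 || !p.2)) := by
  induction l with
  | nil => simp
  | cons b t ih =>
    cases b
    · cases t with
      | nil => simp
      | cons c u =>
        simp only [List.all_cons, List.tail_cons, List.zip_cons_cons] at *
        cases c <;> simp_all
    · simp

theorem dropWhile_all_eq_g (l : List Bool) :
    (l.dropWhile id).all (fun b => !b) = (l.zip l.tail).all (fun p => p.1 || !p.2) := by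
  induction l with
  | nil => simp
  | cons b t ih =>
    cases b
    · rw [show (false :: t).dropWhile id = false :: t by simp]
      rw [all_not_eq_g]; simp
    · rw [show (true :: t).dropWhile id = t.dropWhile id by simp]
      rw [ih]
      cases t with
      | nil => simp
      | cons c u => simp [List.zip_cons_cons]

theorem core_eq (cs : List Bool) :
    ((cs.dropWhile id).all (fun b => !b) && decide (0 < (cs.takeWhile id).length))
      = (cs.headD false && (cs.zip cs.tail).all (fun p => p.1 || !p.2)) := by
  cases cs with
  | nil => simp
  | cons b t =>
    cases b
    · simp
    · simp only [List.takeWhile_cons, id, List.headD_cons]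
      simpa using dropWhile_all_eq_g (true :: t)

-- ===== VERDICT (by name: the statement is the Claim_ definition above) =====
theorem hillno_spec : Claim_equal_hillno := by
  intro num _
  unfold Spec_hillno hillno hillno_alt
  set d := (PySem.Int.toStr |num|).toList with hd
  by_cases h : d.length <= 2
  · simp [h]
  · simp only [if_neg h]
    have hp := peak_eq d 0
    simp only [List.drop_zero, Nat.zero_add] at hp
    rw [for_eq d (hillnoPeak d d.length 0), hp, drop_takeWhile_len, ← core_eq]
    cases hC : ((hillnoComps d).dropWhile id).all (fun b => !b) <;> simp
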